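-- pv_equiv track=rewrite | github.com/mbonden/podcast-plow | server/core/grading.py | _classify_evidence_strength
-- ===== SOURCE A (Python) =====
-- HIGH_KEYWORDS = {
--     "meta-analysis",
--     "systematic review",
--     "randomized controlled trial",
--     "randomized",
--     "double-blind",
--     "rct",
-- }
--
-- MEDIUM_KEYWORDS = {
--     "cohort",
--     "case-control",
--     "observational",
--     "clinical trial",
--     "pilot",
--     "survey",
--     "study",
-- }
--
-- LOW_KEYWORDS = {
--     "case report",
--     "case series",
--     "animal",
--     "mechanistic",
--     "in vitro",
--     "cell",
--     "expert opinion",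
-- }
--
-- def _classify_evidence_strength(evidence_type: str | None) -> str:
--     """Return ``high``, ``medium``, or ``low`` for a textual type label."""
--
--     if not evidence_type:
--         return "low"
--
--     etype = evidence_type.strip().lower()
--     if not etype:
--         return "low"
--     if any(keyword in etype for keyword in HIGH_KEYWORDS):
--         return "high"
--     if any(keyword in etype for keyword in MEDIUM_KEYWORDS):
--         return "medium"
--     if any(keyword in etype for keyword in LOW_KEYWORDS):
--         return "low"
--     # default to medium quality when uncertain – better than unsupported but
--     # not as strong as a randomized/meta analysis.
--     return "medium"
-- ===== SOURCE B (Python) =====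
-- HIGH_KEYWORDS = {
--     "meta-analysis",
--     "systematic review",
--     "randomized controlled trial",
--     "randomized",
--     "double-blind",
--     "rct",
-- }
--
-- MEDIUM_KEYWORDS = {
--     "cohort",
--     "case-control",
--     "observational",
--     "clinical trial",
--     "pilot",
--     "survey",
--     "study",
-- }
--
-- LOW_KEYWORDS = {
--     "case report",
--     "case series",
--     "animal",
--     "mechanistic",
--     "in vitro",
--     "cell",
--     "expert opinion",
-- }
--
-- # One flat index: every keyword paired with its priority rank (0=high, 1=medium, 2=low).
-- _RANKED = (
--     [(kw, 0) for kw in HIGH_KEYWORDS]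
--     + [(kw, 1) for kw in MEDIUM_KEYWORDS]
--     + [(kw, 2) for kw in LOW_KEYWORDS]
-- )
--
-- _LABELS = ("high", "medium", "low")
--
--
-- def _classify_evidence_strength(evidence_type: str | None) -> str:
--     """Return ``high``, ``medium``, or ``low`` for a textual type label."""
--
--     if not evidence_type:
--         return "low"
--
--     etype = evidence_type.strip().lower()
--     if not etype:
--         return "low"
--
--     best = None
--     for keyword, rank in _RANKED:
--         if keyword in etype:
--             best = rank if best is None else min(best, rank)
--
--     return _LABELS[best] if best is not None else "medium"
-- ===== Notes on version B (the rewrite author's own statement) =====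
-- stated objective: alternative
-- what changed: Replaced the three ordered short-circuiting any()-scans over separate keyword sets by a single accumulating pass over one flat (keyword, rank) index that keeps the minimum matched rank, with a rank->label table and a 'medium' default when nothing matched.
import Mathlib
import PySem

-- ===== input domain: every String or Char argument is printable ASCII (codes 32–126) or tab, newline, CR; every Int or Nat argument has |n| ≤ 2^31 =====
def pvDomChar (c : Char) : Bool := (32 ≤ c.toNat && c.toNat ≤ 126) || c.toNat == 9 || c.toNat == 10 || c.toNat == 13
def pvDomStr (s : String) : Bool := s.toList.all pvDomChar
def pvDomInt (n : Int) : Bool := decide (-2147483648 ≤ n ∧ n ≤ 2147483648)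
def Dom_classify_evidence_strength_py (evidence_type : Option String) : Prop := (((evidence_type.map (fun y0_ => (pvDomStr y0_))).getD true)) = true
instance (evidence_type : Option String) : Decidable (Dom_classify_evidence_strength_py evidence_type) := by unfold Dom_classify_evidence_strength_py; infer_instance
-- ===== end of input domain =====

-- B replaces A's three ordered keyword scans by one pass over a flat (keyword, rank) index taking the minimum matched rank (alternative decomposition, same cost).


-- ===== PORT A =====
def pvHighKeywords : PySem.Set String :=
  PySem.Set.ofList ["meta-analysis", "systematic review", "randomized controlled trial",
    "randomized", "double-blind", "rct"]

def pvMediumKeywords : PySem.Set String :=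
  PySem.Set.ofList ["cohort", "case-control", "observational", "clinical trial",
    "pilot", "survey", "study"]

def pvLowKeywords : PySem.Set String :=
  PySem.Set.ofList ["case report", "case series", "animal", "mechanistic",
    "in vitro", "cell", "expert opinion"]

def classify_evidence_strength_py (evidence_type : Option String) : String :=
  match evidence_type with
  | none => "low"
  | some s =>
    if s = "" then "low"
    else
      let etype := PySem.Str.lower (PySem.Str.strip s)
      if etype = "" then "low"
      else if pvHighKeywords.any (fun keyword => PySem.Str.isIn keyword etype) then "high"
      else if pvMediumKeywords.any (fun keyword => PySem.Str.isIn keyword etype) then "medium"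
      else if pvLowKeywords.any (fun keyword => PySem.Str.isIn keyword etype) then "low"
      else "medium"

-- ===== PORT B =====
def pvHighList : List String :=
  ["meta-analysis", "systematic review", "randomized controlled trial",
   "randomized", "double-blind", "rct"]

def pvMediumList : List String :=
  ["cohort", "case-control", "observational", "clinical trial", "pilot", "survey", "study"]

def pvLowList : List String :=
  ["case report", "case series", "animal", "mechanistic", "in vitro", "cell", "expert opinion"]

-- _RANKED: every keyword paired with its priority rank (0=high, 1=medium, 2=low)
def pvRanked : List (String × Int) :=
  pvHighList.map (fun kw => (kw, 0)) ++ pvMediumList.map (fun kw => (kw, 1))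
    ++ pvLowList.map (fun kw => (kw, 2))

def pvLabels : List String := ["high", "medium", "low"]

-- the loop body: keep the minimum rank of the keywords seen so far that occur in etype
def pvStep (etype : String) (best : Option Int) (kr : String × Int) : Option Int :=
  if PySem.Str.isIn kr.1 etype then
    some (match best with | none => kr.2 | some b => min b kr.2)
  else best

def classify_evidence_strength_py_alt (evidence_type : Option String) : String :=
  match evidence_type with
  | none => "low"
  | some s =>
    if s = "" then "low"
    else
      let etype := PySem.Str.lower (PySem.Str.strip s)
      if etype = "" then "low"
      else
        let best := pvRanked.foldl (pvStep etype) none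
        match best with
        | none => "medium"
        | some b => PySem.List.pyGetD pvLabels b "medium"  -- _LABELS[best]; b ∈ {0,1,2}, always in range

-- ===== PRECONDITION & SPEC =====
def Spec_classify_evidence_strength_py (evidence_type : Option String) (out : String) : Prop := out = classify_evidence_strength_py_alt evidence_type
instance (evidence_type : Option String) (out : String) : Decidable (Spec_classify_evidence_strength_py evidence_type out) := by unfold Spec_classify_evidence_strength_py; infer_instance

-- ===== CLAIM (what is proved, stated in full; the proofs are below) =====
def Claim_equal_classify_evidence_strength_py : Prop := ∀ (evidence_type : Option String), Dom_classify_evidence_strength_py evidence_type → Spec_classify_evidence_strength_py evidence_type (classify_evidence_strength_py evidence_type)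

-- ===== LEMMAS AND PROOFS =====

-- the "minimum so far" combination pvStep applies on a hit
def pvComb (acc : Option Int) (r : Int) : Int :=
  match acc with | none => r | some b => min b r

theorem pvComb_le (acc : Option Int) (r : Int) : pvComb acc r ≤ r := by
  cases acc <;> simp [pvComb]

-- folding pvStep over a constant-rank group: any hit gives some (pvComb acc r), no hit leaves acc
theorem pv_fold_const (etype : String) (ks : List String) (r : Int) (acc : Option Int) :
    (ks.map (fun kw => (kw, r))).foldl (pvStep etype) acc =
      if ks.any (fun kw => PySem.Str.isIn kw etype) then some (pvComb acc r) else acc := by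
  induction ks generalizing acc with
  | nil => simp
  | cons k ks ih =>
    simp only [List.map_cons, List.foldl_cons, List.any_cons]
    by_cases h : PySem.Str.isIn k etype = true
    · have hstep : pvStep etype acc (k, r) = some (pvComb acc r) := by
        simp only [pvStep, pvComb, h, if_pos]
      rw [hstep, ih]
      simp only [h, Bool.true_or, if_true]
      by_cases h2 : (ks.any fun kw => PySem.Str.isIn kw etype) = true
      · rw [if_pos h2]
        have : pvComb (some (pvComb acc r)) r = pvComb acc r := by
          simp only [pvComb]
          exact min_eq_left (pvComb_le acc r)
        rw [this]
      · rw [if_neg h2]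
    · have hstep : pvStep etype acc (k, r) = acc := by
        simp only [pvStep]
        rw [if_neg h]
      rw [hstep, ih]
      simp only [show PySem.Str.isIn k etype = false from by simpa using h, Bool.false_or]

theorem classify_eq (evidence_type : Option String) :
    classify_evidence_strength_py evidence_type = classify_evidence_strength_py_alt evidence_type := by
  cases evidence_type with
  | none => rfl
  | some s =>
    simp only [classify_evidence_strength_py, classify_evidence_strength_py_alt]
    by_cases hs : s = ""
    · simp [hs]
    · simp only [hs, if_false]
      set etype := PySem.Str.lower (PySem.Str.strip s) with hety
      by_cases he : etype = ""
      · simp [he]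
      · simp only [he, if_false]
        rw [show pvRanked = pvHighList.map (fun kw => (kw, (0:Int)))
              ++ pvMediumList.map (fun kw => (kw, (1:Int)))
              ++ pvLowList.map (fun kw => (kw, (2:Int))) from rfl]
        rw [List.foldl_append, List.foldl_append,
            pv_fold_const, pv_fold_const, pv_fold_const]
        have hH : pvHighKeywords.any (fun keyword => PySem.Str.isIn keyword etype)
            = pvHighList.any (fun kw => PySem.Str.isIn kw etype) := rfl
        have hM : pvMediumKeywords.any (fun keyword => PySem.Str.isIn keyword etype)
            = pvMediumList.any (fun kw => PySem.Str.isIn kw etype) := rfl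
        have hL : pvLowKeywords.any (fun keyword => PySem.Str.isIn keyword etype)
            = pvLowList.any (fun kw => PySem.Str.isIn kw etype) := rfl
        rw [hH, hM, hL]
        cases h0 : pvHighList.any (fun kw => PySem.Str.isIn kw etype) <;>
        cases h1 : pvMediumList.any (fun kw => PySem.Str.isIn kw etype) <;>
        cases h2 : pvLowList.any (fun kw => PySem.Str.isIn kw etype) <;>
          rfl

-- ===== VERDICT (by name: the statement is the Claim_ definition above) =====
theorem classify_evidence_strength_py_spec : Claim_equal_classify_evidence_strength_py := by
  intro evidence_type _
  exact classify_eq evidence_type
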